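-- pv_equiv track=rewrite | github.com/draialexis/Y2_Py | py_cc2/exercice2.py | close_30
-- ===== SOURCE A (Python) =====
-- def close_30(l):
--     l = sorted(l)
--     streaks = [0]
--     close = 0
--     for i in range(len(l) - 1):
--         if abs(l[i] - l[i+1])  <= 30:
--             close += 1
--         else:
--             if close > 0:
--                 streaks.append(close)
--                 close = 0
--     if close > 0:
--         streaks.append(close)
--     return max(streaks)
-- ===== SOURCE B (Python) =====
-- def _runs(flags):
--     """Lengths of the maximal runs of True in flags, by recursive splitting."""
--     if not flags:
--         return []
--     if not flags[0]:
--         return _runs(flags[1:])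
--     n = 1
--     while n < len(flags) and flags[n]:
--         n += 1
--     return [n] + _runs(flags[n:])
--
--
-- def close_30(l):
--     s = sorted(l)
--     flags = [abs(a - b) <= 30 for a, b in zip(s, s[1:])]
--     return max(_runs(flags), default=0)
-- ===== Notes on version B (the rewrite author's own statement) =====
-- stated objective: alternative
-- what changed: Instead of A's manual reset-and-append accumulator loop over indices, B builds the list of adjacent-pair closeness flags of the sorted input and computes the maximal run of True flags by a recursive run-splitting decomposition, taking the max run length with default 0.
import Mathlib
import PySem

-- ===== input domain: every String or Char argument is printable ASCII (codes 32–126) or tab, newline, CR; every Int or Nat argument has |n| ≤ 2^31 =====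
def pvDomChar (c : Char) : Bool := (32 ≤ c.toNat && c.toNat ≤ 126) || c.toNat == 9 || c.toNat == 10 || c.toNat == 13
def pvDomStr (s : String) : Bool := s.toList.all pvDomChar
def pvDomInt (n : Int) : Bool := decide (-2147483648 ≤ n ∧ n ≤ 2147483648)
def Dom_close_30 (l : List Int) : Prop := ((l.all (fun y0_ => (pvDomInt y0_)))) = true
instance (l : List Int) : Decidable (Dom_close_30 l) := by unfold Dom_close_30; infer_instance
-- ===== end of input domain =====

-- B replaces A's manual reset-and-append accumulator loop over indices by building the
-- adjacent-pair closeness flags of the sorted input and recursively splitting them into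
-- maximal runs of True, returning the longest run (default 0); same result, similar cost.

-- ===== PORT A =====
def close_30 (l : List Int) : Int :=
  let s := PySem.List.sorted l (fun x => x) false
  -- indices drawn from range(len(l)-1) are always in range, so pyGetD's default is never used
  let st := (PySem.List.pyRange 0 ((s.length : Int) - 1) 1).foldl
    (fun (st : List Int × Int) (i : Int) =>
      if |PySem.List.pyGetD s i 0 - PySem.List.pyGetD s (i + 1) 0| ≤ 30 then
        (st.1, st.2 + 1)
      else if st.2 > 0 then (st.1 ++ [st.2], 0) else st)
    ([0], 0)
  let streaks := if st.2 > 0 then st.1 ++ [st.2] else st.1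
  (PySem.List.max? streaks (fun x => x)).getD 0

-- ===== PORT B =====
-- lengths of the maximal runs of True in flags, by recursive splitting (Source B's _runs)
def pvRuns : List Bool → List Int
  | [] => []
  | false :: rest => pvRuns rest
  | true :: rest => ((1 : Int) + (rest.takeWhile id).length) :: pvRuns (rest.dropWhile id)
termination_by fs => fs.length
decreasing_by
  · simp
  · simpa using Nat.lt_succ_of_le (List.length_dropWhile_le id rest)

def close_30_alt (l : List Int) : Int :=
  let s := PySem.List.sorted l (fun x => x) false
  let flags := (s.zip s.tail).map (fun p => decide (|p.1 - p.2| ≤ 30))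
  (PySem.List.max? (pvRuns flags) (fun x => x)).getD 0

-- ===== PRECONDITION & SPEC =====
def Spec_close_30 (l : List Int) (out : Int) : Prop := out = close_30_alt l
instance (l : List Int) (out : Int) : Decidable (Spec_close_30 l out) := by unfold Spec_close_30; infer_instance

-- ===== CLAIM (what is proved, stated in full; the proofs are below) =====
def Claim_equal_close_30 : Prop := ∀ (l : List Int), Dom_close_30 l → Spec_close_30 l (close_30 l)

-- ===== LEMMAS AND PROOFS =====

-- A's loop body, abstracted over the closeness flag of the pair at the current index.
def pvStep (st : List Int × Int) : Bool → List Int × Int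
  | true => (st.1, st.2 + 1)
  | false => if st.2 > 0 then (st.1 ++ [st.2], 0) else st

-- the best streak reachable from current run length c over the remaining flags
def pvCont : List Bool → Int → Int
  | [], c => c
  | true :: fs, c => pvCont fs (c + 1)
  | false :: fs, c => max c (pvCont fs 0)

lemma pvCont_nonneg (fs : List Bool) (c : Int) (hc : 0 ≤ c) : 0 ≤ pvCont fs c := by
  induction fs generalizing c with
  | nil => simpa [pvCont]
  | cons f fs ih =>
    cases f
    · simp only [pvCont]
      exact le_max_of_le_left hc
    · simp only [pvCont]
      exact ih (c + 1) (by omega)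

lemma pv_foldr_max_nonneg (t : List Int) : 0 ≤ t.foldr max 0 := by
  induction t with
  | nil => simp
  | cons a t ih => simpa using Or.inr ih

-- foldr max with a nonnegative seed pulls the seed out
lemma pv_foldr_max_seed (t : List Int) (c : Int) (hc : 0 ≤ c) :
    t.foldr max c = max (t.foldr max 0) c := by
  induction t with
  | nil => simp [max_eq_right hc]
  | cons a t ih => simp [List.foldr, ih, max_assoc]

lemma pv_foldl_max_eq_foldr (t : List Int) (x : Int) (hx : 0 ≤ x) :
    t.foldl max x = max x (t.foldr max 0) := by
  induction t generalizing x with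
  | nil => simp [max_eq_left hx]
  | cons a t ih =>
    simp only [List.foldl, List.foldr]
    rw [ih (max x a) (le_trans hx (le_max_left _ _))]
    rw [max_assoc]

-- Python max(0 :: t) (as ported via PySem.List.max?) is foldr max 0 t
lemma pv_maxD (t : List Int) :
    (PySem.List.max? (0 :: t) (fun x => x)).getD 0 = t.foldr max 0 := by
  rw [PySem.List.max?_id_cons]
  simp only [Option.getD_some]
  rw [pv_foldl_max_eq_foldr t 0 le_rfl]
  exact max_eq_right (pv_foldr_max_nonneg t)

-- finishing step of A: flush the pending run and take the max
def pvFinish (st : List Int × Int) : Int :=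
  (PySem.List.max? (if st.2 > 0 then st.1 ++ [st.2] else st.1) (fun x => x)).getD 0

lemma pv_foldr_singleton (c : Int) (hc : 0 ≤ c) : List.foldr max 0 [c] = c := by
  simp [max_eq_left hc]

-- main invariant of A's loop
lemma pvA_inv (fs : List Bool) (t : List Int) (c : Int) (hc : 0 ≤ c) :
    pvFinish (fs.foldl pvStep (0 :: t, c)) = max (t.foldr max 0) (pvCont fs c) := by
  induction fs generalizing t c with
  | nil =>
    by_cases h : c > 0
    · simp only [List.foldl, pvFinish, pvCont, h, if_pos]
      rw [show (0 : Int) :: t ++ [c] = 0 :: (t ++ [c]) from rfl, pv_maxD, List.foldr_append,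
          pv_foldr_singleton c hc, pv_foldr_max_seed t c hc]
    · have hc0 : c = 0 := by omega
      subst hc0
      simp only [List.foldl, pvFinish, pvCont, if_neg h]
      rw [pv_maxD, max_eq_left (pv_foldr_max_nonneg t)]
  | cons f fs ih =>
    cases f
    · -- false flag: flush / keep
      by_cases h : c > 0
      · simp only [List.foldl, pvStep, h, if_pos]
        rw [show (0 : Int) :: t ++ [c] = 0 :: (t ++ [c]) from rfl, ih (t ++ [c]) 0 le_rfl,
            List.foldr_append, pv_foldr_singleton c hc, pv_foldr_max_seed t c hc]
        simp only [pvCont]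
        exact max_assoc _ _ _
      · have hc0 : c = 0 := by omega
        subst hc0
        simp only [List.foldl, pvStep, if_neg h]
        rw [ih t 0 le_rfl]
        simp only [pvCont]
        rw [max_eq_right (pvCont_nonneg fs 0 le_rfl)]
    · -- true flag: extend the run
      simp only [List.foldl, pvStep]
      rw [ih t (c + 1) (by omega)]
      simp only [pvCont]

-- pvCont over a leading block of Trues
lemma pvCont_split (fs : List Bool) (c : Int) (hc : 0 ≤ c) :
    pvCont fs c = max (c + ((fs.takeWhile id).length : Int)) (pvCont (fs.dropWhile id) 0) := by
  induction fs generalizing c with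
  | nil => simp [pvCont, max_eq_left hc]
  | cons f fs ih =>
    cases f
    · simp only [pvCont, List.takeWhile_cons, List.dropWhile_cons, id_eq, Bool.false_eq_true,
        if_false, List.length_nil, Int.natCast_zero, add_zero]
      rw [max_eq_right (pvCont_nonneg fs 0 le_rfl)]
    · simp only [pvCont, List.takeWhile_cons, List.dropWhile_cons, id_eq, if_true,
        List.length_cons]
      rw [ih (c + 1) (by omega)]
      omega

-- runs, folded with max, compute pvCont from a fresh run
lemma pvRuns_max (fs : List Bool) :
    (pvRuns fs).foldr max 0 = pvCont fs 0 := by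
  induction fs using pvRuns.induct with
  | case1 => simp [pvRuns, pvCont]
  | case2 rest ih =>
    simp only [pvRuns, pvCont, ih]
    exact (max_eq_right (pvCont_nonneg rest 0 le_rfl)).symm
  | case3 rest ih =>
    simp only [pvRuns, List.foldr]
    rw [ih, pvCont_split (true :: rest) 0 le_rfl]
    simp only [List.takeWhile_cons, List.dropWhile_cons, id_eq, if_true, List.length_cons]
    omega

lemma pvRuns_nonneg (fs : List Bool) : ∀ x ∈ pvRuns fs, 0 ≤ x := by
  induction fs using pvRuns.induct with
  | case1 => simp [pvRuns]
  | case2 rest ih => simpa [pvRuns] using ih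
  | case3 rest ih =>
    intro x hx
    simp only [pvRuns, List.mem_cons] at hx
    rcases hx with hx | hx
    · omega
    · exact ih x hx

-- Python max(runs, default=0) is foldr max 0 over runs (runs are nonnegative)
lemma pv_maxD_runs (fs : List Bool) :
    (PySem.List.max? (pvRuns fs) (fun x => x)).getD 0 = (pvRuns fs).foldr max 0 := by
  cases h : pvRuns fs with
  | nil =>
    have h0 : PySem.List.max? ([] : List Int) (fun x => x) = none := by
      rw [PySem.List.max?_eq_none_iff]
    simp [h0]
  | cons x t =>
    rw [PySem.List.max?_id_cons]
    have hx : 0 ≤ x := pvRuns_nonneg fs x (by rw [h]; exact List.mem_cons_self)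
    simp only [Option.getD_some, List.foldr]
    rw [pv_foldl_max_eq_foldr t x hx]

-- the index-based flag list equals the zip-based one
lemma pv_flags_eq (s : List Int) :
    (PySem.List.pyRange 0 ((s.length : Int) - 1) 1).map
        (fun i => decide (|PySem.List.pyGetD s i 0 - PySem.List.pyGetD s (i + 1) 0| ≤ 30))
      = (s.zip s.tail).map (fun p => decide (|p.1 - p.2| ≤ 30)) := by
  rw [PySem.List.pyRange_one, List.map_map]
  apply List.ext_getElem
  · simp only [List.length_map, List.length_range, List.length_zip, List.length_tail]
    omega
  · intro k h1 h2
    have hk : k < s.length - 1 := by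
      simpa [List.length_zip] using h2
    simp only [List.getElem_map, Function.comp_apply, List.getElem_range, List.getElem_zip,
      zero_add]
    rw [PySem.List.pyGetD_eq_getElem s 0 (by positivity) (by omega),
        PySem.List.pyGetD_eq_getElem s 0 (by positivity) (by omega)]
    have e1 : ((k : Int)).toNat = k := Int.toNat_natCast k
    have e2 : ((k : Int) + 1).toNat = k + 1 := by omega
    simp only [e1, e2, List.getElem_tail]

-- ===== VERDICT (by name: the statement is the Claim_ definition above) =====
theorem close_30_spec : Claim_equal_close_30 := by
  intro l _
  show close_30 l = close_30_alt l
  simp only [close_30, close_30_alt]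
  generalize PySem.List.sorted l (fun x => x) false = s
  have hfun : (fun (st : List Int × Int) (i : Int) =>
        if |PySem.List.pyGetD s i 0 - PySem.List.pyGetD s (i + 1) 0| ≤ 30 then (st.1, st.2 + 1)
        else if st.2 > 0 then (st.1 ++ [st.2], 0) else st)
      = (fun (st : List Int × Int) (i : Int) =>
          pvStep st (decide (|PySem.List.pyGetD s i 0 - PySem.List.pyGetD s (i + 1) 0| ≤ 30))) := by
    funext st i
    by_cases h : |PySem.List.pyGetD s i 0 - PySem.List.pyGetD s (i + 1) 0| ≤ 30 <;>
      simp [pvStep, h]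
  rw [hfun, ← List.foldl_map, pv_flags_eq s]
  have hfin : ∀ st : List Int × Int,
      (PySem.List.max? (if st.2 > 0 then st.1 ++ [st.2] else st.1) (fun x => x)).getD 0
        = pvFinish st := fun _ => rfl
  rw [hfin]
  have hinv := pvA_inv ((s.zip s.tail).map (fun p => decide (|p.1 - p.2| ≤ 30))) [] 0 le_rfl
  simp only [List.foldr_nil] at hinv
  rw [hinv, max_eq_right (pvCont_nonneg _ 0 le_rfl), ← pvRuns_max, ← pv_maxD_runs]
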